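-- pv_equiv track=rewrite | github.com/zedosoad1995/Nerdle | get_combinations_helper.py | get_operation_combinations
-- ===== SOURCE A (Python) =====
-- import itertools
--
-- def get_operation_combinations(calculation, positions, symbols):
--     possible_calculations = []
--
--     possible_combinations = list(itertools.product(*([symbols] * len(positions))))
--
--     for symbols in possible_combinations:
--         calc = list(calculation)
--         for i, symbol in enumerate(symbols):
--             pos = positions[i]
--             calc[pos] = symbol
--
--         possible_calculations.append("".join(calc))
--
--     return possible_calculations
-- ===== SOURCE B (Python) =====
-- def get_operation_combinations(calculation, positions, symbols):
--     results = []
--     calc = list(calculation)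
--     n = len(positions)
--
--     def rec(depth):
--         if depth == n:
--             results.append("".join(calc))
--             return
--         pos = positions[depth]
--         for symbol in symbols:
--             calc[pos] = symbol
--             rec(depth + 1)
--
--     rec(0)
--     return results
-- ===== Notes on version B (the rewrite author's own statement) =====
-- stated objective: alternative
-- what changed: Replaced the materialised itertools.product list plus per-combination copy-and-splice loop with a depth-first recursion that mutates a single working char list position-by-position and emits each joined string at the leaves.
import Mathlib
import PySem

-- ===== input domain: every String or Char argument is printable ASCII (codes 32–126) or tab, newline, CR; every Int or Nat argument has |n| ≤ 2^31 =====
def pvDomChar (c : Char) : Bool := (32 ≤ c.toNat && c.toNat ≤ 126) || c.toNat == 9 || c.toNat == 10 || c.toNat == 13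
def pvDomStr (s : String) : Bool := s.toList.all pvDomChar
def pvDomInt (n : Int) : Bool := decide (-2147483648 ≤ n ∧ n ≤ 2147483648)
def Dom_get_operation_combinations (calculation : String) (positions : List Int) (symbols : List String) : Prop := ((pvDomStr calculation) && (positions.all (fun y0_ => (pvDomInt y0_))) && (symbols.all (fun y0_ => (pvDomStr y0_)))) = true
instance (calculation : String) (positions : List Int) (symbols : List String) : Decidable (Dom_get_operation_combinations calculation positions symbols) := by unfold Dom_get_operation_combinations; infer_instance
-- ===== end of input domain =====

-- B replaces A's materialised itertools.product list + per-combination copy-and-splice with a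
-- depth-first recursion over the positions that rewrites one working char list in place
-- (objective: alternative decomposition, same output in the same order).

-- ===== PORT A =====
-- itertools.product(*([symbols] * n)): n-fold product, leftmost factor varies slowest
def pvProdN (n : Nat) (symbols : List String) : List (List String) :=
  match n with
  | 0 => [[]]
  | n + 1 => symbols.flatMap (fun x => (pvProdN n symbols).map (fun rest => x :: rest))

def get_operation_combinations (calculation : String) (positions : List Int) (symbols : List String) : List String :=
  -- possible_combinations = list(itertools.product(*([symbols] * len(positions))))
  let possible_combinations := pvProdN positions.length symbols
  -- for symbols in possible_combinations: cl = list(calculation); for i, symbol in enumerate(symbols): cl[positions[i]] = symbol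
  possible_combinations.foldl (fun possible_calculations combo =>
    let cl := calculation.toList.map (fun c => String.ofList [c])
    let cl := (PySem.List.enumerate combo 0).foldl
      (fun cl p => PySem.List.pySetD cl (PySem.List.pyGetD positions p.1 (0 : Int)) p.2) cl
    possible_calculations ++ [String.join cl]) []

-- ===== PORT B =====
-- rec(depth): at each depth assign positions[depth] := symbol for each symbol, recurse; leaf joins cl
def pvAltRec (symbols : List String) (ps : List Int) (cl : List String) : List String :=
  match ps with
  | [] => [String.join cl]
  | p :: rest => symbols.flatMap (fun symbol => pvAltRec symbols rest (PySem.List.pySetD cl p symbol))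

def get_operation_combinations_alt (calculation : String) (positions : List Int) (symbols : List String) : List String :=
  pvAltRec symbols positions (calculation.toList.map (fun c => String.ofList [c]))

-- ===== PRECONDITION & SPEC =====
-- Pre_ excludes exactly the inputs on which Python A raises IndexError: some position out of
-- range while symbols is nonempty (with symbols = [] no assignment ever runs and A returns []).
def Pre_get_operation_combinations (calculation : String) (positions : List Int) (symbols : List String) : Prop :=
  symbols = [] ∨ ∀ p ∈ positions, PySem.Raise.InRange calculation.toList.length p
instance (calculation : String) (positions : List Int) (symbols : List String) : Decidable (Pre_get_operation_combinations calculation positions symbols) := by unfold Pre_get_operation_combinations; infer_instance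

def pvWitness_get_operation_combinations : String × List Int × List String := ("1+2=3", [1, 3], ["+", "-", "*"])

def Spec_get_operation_combinations (calculation : String) (positions : List Int) (symbols : List String) (out : List String) : Prop := out = get_operation_combinations_alt calculation positions symbols
instance (calculation : String) (positions : List Int) (symbols : List String) (out : List String) : Decidable (Spec_get_operation_combinations calculation positions symbols out) := by unfold Spec_get_operation_combinations; infer_instance

-- ===== CLAIM (what is proved, stated in full; the proofs are below) =====
def Claim_equal_get_operation_combinations : Prop := ∀ (calculation : String) (positions : List Int) (symbols : List String), Dom_get_operation_combinations calculation positions symbols → Pre_get_operation_combinations calculation positions symbols → Spec_get_operation_combinations calculation positions symbols (get_operation_combinations calculation positions symbols)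

-- ===== LEMMAS AND PROOFS =====

-- proof-side helper: apply the substitutions pairwise (positions zipped with the combination)
def pvApplyZip (cl : List String) (ps : List Int) (xs : List String) : List String :=
  match ps, xs with
  | p :: ps', x :: xs' => pvApplyZip (PySem.List.pySetD cl p x) ps' xs'
  | _, _ => cl

lemma pvProdN_mem_length {n : Nat} {symbols : List String} {c : List String}
    (h : c ∈ pvProdN n symbols) : c.length = n := by
  induction n generalizing c with
  | zero => simp [pvProdN] at h; simp [h]
  | succ n ih =>
    simp [pvProdN] at h
    obtain ⟨x, -, rest, hr, rfl⟩ := h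
    simp [ih hr]

lemma pvEnumFold (positions : List Int) (combo : List String) :
    ∀ (s : Nat) (cl : List String), s + combo.length ≤ positions.length →
    (PySem.List.enumerate combo (s : Int)).foldl
      (fun cl p => PySem.List.pySetD cl (PySem.List.pyGetD positions p.1 (0 : Int)) p.2) cl
    = pvApplyZip cl (positions.drop s) combo := by
  induction combo with
  | nil => intro s cl h; simp [PySem.List.enumerate_nil, pvApplyZip]
  | cons x xs ih =>
    intro s cl h
    simp only [List.length_cons] at h
    have hs : s < positions.length := by omega
    rw [PySem.List.enumerate_cons]
    simp only [List.foldl_cons]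
    have hgd : PySem.List.pyGetD positions (s : Int) (0 : Int) = positions[s] := by
      simp [PySem.List.pyGetD_natCast, List.getD_eq_getElem?_getD, List.getElem?_eq_getElem hs]
    have hdrop : positions.drop s = positions[s] :: positions.drop (s + 1) :=
      List.drop_eq_getElem_cons hs
    rw [hgd, hdrop]
    have hcast : (s : Int) + 1 = ((s + 1 : Nat) : Int) := by push_cast; ring
    rw [hcast, ih (s + 1) _ (by omega)]
    rfl

lemma pvAltRec_eq_map (symbols : List String) (ps : List Int) :
    ∀ cl : List String, pvAltRec symbols ps cl
      = (pvProdN ps.length symbols).map (fun combo => String.join (pvApplyZip cl ps combo)) := by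
  induction ps with
  | nil => intro cl; simp [pvAltRec, pvProdN, pvApplyZip]
  | cons p rest ih =>
    intro cl
    simp only [pvAltRec, List.length_cons, pvProdN, List.map_flatMap, List.map_map]
    refine List.flatMap_congr ?_
    intro x _
    rw [ih]
    rfl

theorem pv_main (calculation : String) (positions : List Int) (symbols : List String) :
    get_operation_combinations calculation positions symbols
      = get_operation_combinations_alt calculation positions symbols := by
  unfold get_operation_combinations get_operation_combinations_alt
  rw [pvAltRec_eq_map]
  rw [PySem.List.foldl_append_singleton_eq_map]
  refine List.map_congr_left ?_
  intro combo hc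
  have hlen := pvProdN_mem_length hc
  have h := pvEnumFold positions combo 0 (calculation.toList.map (fun c => String.ofList [c])) (by omega)
  simp only [Nat.cast_zero] at h
  rw [h]
  simp

-- ===== VERDICT (by name: the statement is the Claim_ definition above) =====
theorem get_operation_combinations_spec : Claim_equal_get_operation_combinations := by
  intro calculation positions symbols _ _
  unfold Spec_get_operation_combinations
  exact pv_main calculation positions symbols
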